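-- pv_equiv track=rewrite | github.com/takapdayon/atcoder | python/abc/AtCoderBeginnerContest134/C.py | exception_handling
-- ===== SOURCE A (Python) =====
-- import copy
--
-- def exception_handling(n, ali):
--
--     sortali = copy.copy(ali)
--     sortali.sort(reverse=True)
--
--     alimax = sortali[0]
--     alimax2 = sortali[1]
--
--     ans = []
--
--     for i in ali:
--         if i != alimax:
--             ans.append(alimax)
--         else:
--             ans.append(alimax2)
--
--     return ans
-- ===== SOURCE B (Python) =====
-- def exception_handling(n, ali):
--     # single pass tracking the two largest values (with multiplicity)
--     m1 = m2 = None
--     for x in ali: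
--         if m1 is None or x > m1:
--             m1, m2 = x, m1
--         elif m2 is None or x > m2:
--             m2 = x
--     return [m2 if x == m1 else m1 for x in ali]
-- ===== Notes on version B (the rewrite author's own statement) =====
-- stated objective: faster
-- what changed: Replaced copy+descending sort followed by indexing sortali[0]/sortali[1] with a single pass that tracks the top two values (with multiplicity), then maps over the list.
import Mathlib
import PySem

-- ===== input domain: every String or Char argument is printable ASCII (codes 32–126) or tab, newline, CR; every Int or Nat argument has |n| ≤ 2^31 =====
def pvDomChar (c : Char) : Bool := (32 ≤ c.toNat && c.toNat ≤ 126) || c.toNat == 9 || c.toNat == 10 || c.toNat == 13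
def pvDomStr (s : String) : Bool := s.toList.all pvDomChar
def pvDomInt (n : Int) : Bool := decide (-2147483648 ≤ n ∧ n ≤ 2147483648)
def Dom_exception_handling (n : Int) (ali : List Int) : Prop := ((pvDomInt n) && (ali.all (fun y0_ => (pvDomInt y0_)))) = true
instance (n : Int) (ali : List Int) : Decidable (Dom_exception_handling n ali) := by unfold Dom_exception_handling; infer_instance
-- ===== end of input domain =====

-- B replaces A's copy + descending sort + sortali[0]/sortali[1] by a single pass tracking the
-- top two values (O(n) instead of O(n log n)).


-- ===== PORT A =====
-- sortali = sorted copy (reverse=True); alimax = sortali[0]; alimax2 = sortali[1] (IndexError → none,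
-- excluded by Pre_; the [] default is never reached inside Pre_); then the append loop.
def exception_handling (n : Int) (ali : List Int) : List Int :=
  let sortali := PySem.List.sorted ali (fun x => x) true
  match PySem.List.pyGet? sortali 0, PySem.List.pyGet? sortali 1 with
  | some alimax, some alimax2 =>
      ali.foldl (fun ans i => if i != alimax then ans ++ [alimax] else ans ++ [alimax2]) []
  | _, _ => []
-- ===== PORT B =====
-- one loop iteration of Source B: m1/m2 are the Optional top-two accumulators
def ehStep (s : Option Int × Option Int) (x : Int) : Option Int × Option Int :=
  match s with
  | (none, _) => (some x, none)
  | (some a, m2) =>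
      if x > a then (some x, some a)
      else
        match m2 with
        | none => (some a, some x)
        | some b => if x > b then (some a, some x) else (some a, some b)

def exception_handling_alt (n : Int) (ali : List Int) : List Int :=
  match ali.foldl ehStep (none, none) with
  | (some m1, some m2) => ali.map (fun x => if x == m1 then m2 else m1)
  | (none, _) => []       -- in Python B the result would contain None here (len < 2); outside Pre_
  | (some _, none) => []

-- ===== PRECONDITION & SPEC =====
-- A raises IndexError (sortali[1]) whenever the list has fewer than two elements.
def Pre_exception_handling (n : Int) (ali : List Int) : Prop := 2 ≤ ali.length
instance (n : Int) (ali : List Int) : Decidable (Pre_exception_handling n ali) := by unfold Pre_exception_handling; infer_instance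
def pvWitness_exception_handling : Int × List Int := (2, [3, 1])

def Spec_exception_handling (n : Int) (ali : List Int) (out : List Int) : Prop := out = exception_handling_alt n ali
instance (n : Int) (ali : List Int) (out : List Int) : Decidable (Spec_exception_handling n ali out) := by unfold Spec_exception_handling; infer_instance

-- ===== CLAIM (what is proved, stated in full; the proofs are below) =====
def Claim_equal_exception_handling : Prop := ∀ (n : Int) (ali : List Int), Dom_exception_handling n ali → Pre_exception_handling n ali → Spec_exception_handling n ali (exception_handling n ali)

-- ===== LEMMAS AND PROOFS =====

-- the top-two update commutes, so the fold may be evaluated on the sorted rearrangement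
theorem ehStep_rightComm : RightCommutative ehStep := by
  constructor
  intro s x y
  rcases s with ⟨_ | a, _ | b⟩ <;>
    (simp only [ehStep]; split_ifs) <;>
    first
      | rfl
      | (simp_all [Prod.ext_iff]; omega)
      | ((simp only [ehStep]; split_ifs) <;> first | rfl | (simp_all [Prod.ext_iff]; omega))

-- once the two leaders are at least everything that follows, the state is frozen
theorem foldl_ehStep_frozen (l : List Int) (a b : Int)
    (h : ∀ x ∈ l, x ≤ a ∧ x ≤ b) :
    l.foldl ehStep (some a, some b) = (some a, some b) := by
  induction l with
  | nil => rfl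
  | cons x t ih =>
      have hx := h x (List.mem_cons_self ..)
      have : ehStep (some a, some b) x = (some a, some b) := by
        simp only [ehStep]
        split_ifs <;> first | rfl | omega
      simp only [List.foldl_cons, this]
      exact ih (fun y hy => h y (List.mem_cons_of_mem _ hy))

theorem foldl_ehStep_sorted (ali : List Int) (h : 2 ≤ ali.length) :
    ∃ s0 s1 t, PySem.List.sorted ali (fun x => x) true = s0 :: s1 :: t ∧
      ali.foldl ehStep (none, none) = (some s0, some s1) := by
  rcases S_eq : PySem.List.sorted ali (fun x => x) true with _ | ⟨s0, _ | ⟨s1, t⟩⟩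
  · have := PySem.List.length_sorted (xs := ali) (key := fun x : Int => x) (rev := true)
    rw [S_eq] at this; simp at this; omega
  · have := PySem.List.length_sorted (xs := ali) (key := fun x : Int => x) (rev := true)
    rw [S_eq] at this; simp at this; omega
  · refine ⟨s0, s1, t, rfl, ?_⟩
    have hperm : (PySem.List.sorted ali (fun x => x) true).Perm ali :=
      PySem.List.sorted_perm ..
    have := @List.Perm.foldl_eq _ _ ehStep _ _ ehStep_rightComm hperm.symm (none, none)
    rw [this, S_eq]
    have hpw : (s0 :: s1 :: t).Pairwise (fun a b : Int => b ≤ a) := by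
      have := PySem.List.sorted_pairwise_rev (xs := ali) (key := fun x : Int => x)
      rwa [S_eq] at this
    rcases List.pairwise_cons.mp hpw with ⟨h0, hpw1⟩
    rcases List.pairwise_cons.mp hpw1 with ⟨h1, _⟩
    have h10 : s1 ≤ s0 := h0 s1 (List.mem_cons_self ..)
    simp only [List.foldl_cons]
    have e0 : ehStep (none, none) s0 = (some s0, none) := rfl
    have e1 : ehStep (some s0, none) s1 = (some s0, some s1) := by
      simp only [ehStep]; split_ifs <;> first | rfl | omega
    rw [e0, e1]
    exact foldl_ehStep_frozen t s0 s1
      (fun x hx => ⟨le_trans (h1 x hx) h10, h1 x hx⟩)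

-- ===== VERDICT (by name: the statement is the Claim_ definition above) =====
theorem exception_handling_spec : Claim_equal_exception_handling := by
  intro n ali _ hpre
  unfold Spec_exception_handling exception_handling exception_handling_alt
  obtain ⟨s0, s1, t, hS, hfold⟩ := foldl_ehStep_sorted ali hpre
  rw [hS, hfold]
  have g0 : PySem.List.pyGet? (s0 :: s1 :: t) (0 : Int) = some s0 := by
    have h : (0:Int) ≤ (t.length:Int) + 1 := by omega
    simp [PySem.List.pyGet?, PySem.List.pyIdx?, h]
  have g1 : PySem.List.pyGet? (s0 :: s1 :: t) (1 : Int) = some s1 := by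
    simp [PySem.List.pyGet?, PySem.List.pyIdx?]
  simp only [g0, g1]
  have hcongr := PySem.List.foldl_congr_mem (l := ali) (init := ([] : List Int))
    (f := fun ans i => if (i != s0) = true then ans ++ [s0] else ans ++ [s1])
    (g := fun ans i => ans ++ [if (i == s0) = true then s1 else s0])
    (by intro acc x _; by_cases h : x = s0 <;> simp [h])
  rw [hcongr, PySem.List.foldl_append_singleton_eq_map]
  simp
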